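-- pv_equiv track=rewrite | github.com/Jv131103/estudos_python | problemas/exercicio67.py | retornar_somas
-- ===== SOURCE A (Python) =====
-- def retornar_somas(n):
--     soma_ate_n = 0
--     soma_pares_ate_n = 0
--     soma_impares_ate_n = 0
--     for i in range(n):
--         if i % 2 == 0:
--             soma_pares_ate_n += i
--         else:
--             soma_impares_ate_n += i
--         soma_ate_n += i
--     return soma_ate_n, soma_pares_ate_n, soma_impares_ate_n
-- ===== SOURCE B (Python) =====
-- def retornar_somas(n):
--     # Closed-form arithmetic series: O(1) instead of a loop over range(n).
--     if n <= 0: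
--         return 0, 0, 0
--     total = n * (n - 1) // 2
--     k = (n + 1) // 2          # number of even values in range(n)
--     pares = k * (k - 1)       # 0 + 2 + ... + 2*(k-1)
--     return total, pares, total - pares
-- ===== Notes on version B (the rewrite author's own statement) =====
-- stated objective: faster
-- what changed: Replaced the O(n) accumulation loop with closed-form arithmetic-series formulas for the total, even and odd sums.
import Mathlib
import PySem

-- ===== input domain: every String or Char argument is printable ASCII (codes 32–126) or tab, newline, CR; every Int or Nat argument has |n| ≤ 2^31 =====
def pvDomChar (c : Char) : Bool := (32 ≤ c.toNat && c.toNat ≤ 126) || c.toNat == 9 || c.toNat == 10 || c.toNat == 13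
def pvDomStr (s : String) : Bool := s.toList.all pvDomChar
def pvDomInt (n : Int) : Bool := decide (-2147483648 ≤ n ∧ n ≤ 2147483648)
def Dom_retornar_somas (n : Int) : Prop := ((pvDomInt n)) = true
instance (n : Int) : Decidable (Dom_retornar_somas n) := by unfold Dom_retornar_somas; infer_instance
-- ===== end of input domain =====

-- B replaces A's O(n) accumulation loop with closed-form arithmetic-series formulas (objective: faster).

-- ===== PORT A =====
def retornarLoop (st : Int × Int × Int) (i : Int) : Int × Int × Int :=
  if PySem.Int.mod i 2 == 0 then (st.1 + i, st.2.1 + i, st.2.2)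
  else (st.1 + i, st.2.1, st.2.2 + i)

def retornar_somas (n : Int) : List Int :=
  let r := (PySem.List.pyRange 0 n 1).foldl retornarLoop (0, 0, 0)
  [r.1, r.2.1, r.2.2]

-- ===== PORT B =====
def retornar_somas_alt (n : Int) : List Int :=
  if n ≤ 0 then [0, 0, 0]
  else
    let total := PySem.Int.floordiv (n * (n - 1)) 2
    let k := PySem.Int.floordiv (n + 1) 2
    let pares := k * (k - 1)
    [total, pares, total - pares]

-- ===== PRECONDITION & SPEC =====
def Spec_retornar_somas (n : Int) (out : List Int) : Prop := out = retornar_somas_alt n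
instance (n : Int) (out : List Int) : Decidable (Spec_retornar_somas n out) := by unfold Spec_retornar_somas; infer_instance

-- ===== CLAIM (what is proved, stated in full; the proofs are below) =====
def Claim_equal_retornar_somas : Prop := ∀ (n : Int), Dom_retornar_somas n → Spec_retornar_somas n (retornar_somas n)

-- ===== LEMMAS AND PROOFS =====

-- closed form of the fold over range(m) for a natural m
lemma retornarLoop_closed (m : Nat) :
    ((List.range m).map (fun k : Nat => (0 : Int) + (k : Int))).foldl retornarLoop (0, 0, 0) =
      ((m : Int) * ((m : Int) - 1) / 2,
       (((m : Int) + 1) / 2) * (((m : Int) + 1) / 2 - 1),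
       (m : Int) * ((m : Int) - 1) / 2 - (((m : Int) + 1) / 2) * (((m : Int) + 1) / 2 - 1)) := by
  induction m with
  | zero => simp
  | succ m ih =>
      rw [List.range_succ, List.map_append, List.foldl_append, ih]
      simp only [List.map_cons, List.map_nil, List.foldl_cons, List.foldl_nil, retornarLoop]
      rw [PySem.Int.mod_eq_emod_of_pos (by norm_num : (0:Int) < 2)]
      rcases Int.even_or_odd (m : Int) with ⟨t, ht⟩ | ⟨t, ht⟩
      · have h2 : ((0 : Int) + (m : Int)) % 2 = 0 := by omega
        have hT : (m : Int) * ((m : Int) - 1) = 2 * (t * (2 * t - 1)) := by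
          rw [show (m : Int) = 2 * t by omega]; ring
        have hT' : ((m : Int) + 1) * ((m : Int) + 1 - 1) = 2 * (t * (2 * t - 1) + 2 * t) := by
          rw [show (m : Int) = 2 * t by omega]; ring
        have hk : ((m : Int) + 1) / 2 = t := by omega
        have hk' : ((m : Int) + 1 + 1) / 2 = t + 1 := by omega
        simp only [h2, show ((0:Int) == 0) = true from rfl, if_true]
        push_cast
        refine Prod.ext ?_ (Prod.ext ?_ ?_)
        · simp only [hT, hT', hk, hk',
            Int.mul_ediv_cancel_left _ (by norm_num : (2 : Int) ≠ 0)]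
          rw [show (m : Int) = 2 * t by omega]; ring
        · simp only [hT, hT', hk, hk',
            Int.mul_ediv_cancel_left _ (by norm_num : (2 : Int) ≠ 0)]
          rw [show (m : Int) = 2 * t by omega]; ring
        · simp only [hT, hT', hk, hk',
            Int.mul_ediv_cancel_left _ (by norm_num : (2 : Int) ≠ 0)]
          ring
      · have h2 : ((0 : Int) + (m : Int)) % 2 = 1 := by omega
        have hT : (m : Int) * ((m : Int) - 1) = 2 * (t * (2 * t + 1)) := by
          rw [show (m : Int) = 2 * t + 1 by omega]; ring
        have hT' : ((m : Int) + 1) * ((m : Int) + 1 - 1) = 2 * ((t + 1) * (2 * t + 1)) := by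
          rw [show (m : Int) = 2 * t + 1 by omega]; ring
        have hk : ((m : Int) + 1) / 2 = t + 1 := by omega
        have hk' : ((m : Int) + 1 + 1) / 2 = t + 1 := by omega
        simp only [h2, show ((1:Int) == 0) = false from rfl, Bool.false_eq_true, if_false]
        push_cast
        refine Prod.ext ?_ (Prod.ext ?_ ?_)
        · simp only [hT, hT', hk, hk',
            Int.mul_ediv_cancel_left _ (by norm_num : (2 : Int) ≠ 0)]
          rw [show (m : Int) = 2 * t + 1 by omega]; ring
        · simp only [hT, hT', hk, hk',
            Int.mul_ediv_cancel_left _ (by norm_num : (2 : Int) ≠ 0)]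
        · simp only [hT, hT', hk, hk',
            Int.mul_ediv_cancel_left _ (by norm_num : (2 : Int) ≠ 0)]
          rw [show (m : Int) = 2 * t + 1 by omega]; ring

-- ===== VERDICT (by name: the statement is the Claim_ definition above) =====
theorem retornar_somas_spec : Claim_equal_retornar_somas := by
  intro n _
  unfold Spec_retornar_somas
  by_cases hn : n ≤ 0
  · simp [retornar_somas, retornar_somas_alt, hn,
      PySem.List.pyRange_one]
  · have hto : ((n - 0).toNat : Int) = n := by omega
    simp only [retornar_somas, retornar_somas_alt, PySem.List.pyRange_one,
      retornarLoop_closed, hto, if_neg hn,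
      PySem.Int.floordiv_eq_ediv_of_pos (by norm_num : (0:Int) < 2)]
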